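-- pv_equiv track=rewrite | github.com/T76-org/drpd | python/t76/drpd/device/device_internal.py | _has_top_level_comma
-- ===== SOURCE A (Python) =====
-- def _has_top_level_comma(response: str) -> bool:
--     in_quote = False
--     i = 0
--
--     while i < len(response):
--         char = response[i]
--         if char == '"':
--             if in_quote and i + 1 < len(response) and response[i + 1] == '"':
--                 i += 2
--                 continue
--             in_quote = not in_quote
--         elif char == "," and not in_quote:
--             return True
--         i += 1
--
--     return False
-- ===== SOURCE B (Python) =====
-- def _has_top_level_comma(response: str) -> bool:
--     quotes = 0
--     for ch in response:
--         if ch == '"':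
--             quotes += 1
--         elif ch == ',' and quotes % 2 == 0:
--             return True
--     return False
-- ===== Notes on version B (the rewrite author's own statement) =====
-- stated objective: simpler
-- what changed: Replaces the index-based while loop with an in_quote toggle and an escaped-quote lookahead/skip branch by a single for-each pass counting '"' characters: a comma is top-level iff an even number of quotes precede it; the lookahead disappears because an escaped pair adds two quotes and cannot change parity.
import Mathlib
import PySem

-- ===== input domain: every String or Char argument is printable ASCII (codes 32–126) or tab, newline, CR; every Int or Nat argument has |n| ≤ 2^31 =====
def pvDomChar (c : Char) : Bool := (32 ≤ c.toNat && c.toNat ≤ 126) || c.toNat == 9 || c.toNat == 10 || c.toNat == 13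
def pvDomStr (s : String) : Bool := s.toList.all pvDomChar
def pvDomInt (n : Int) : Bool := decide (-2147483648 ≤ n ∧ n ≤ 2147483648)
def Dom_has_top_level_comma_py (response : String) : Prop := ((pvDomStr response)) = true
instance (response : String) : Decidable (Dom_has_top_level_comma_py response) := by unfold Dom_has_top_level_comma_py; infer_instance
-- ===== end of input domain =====

-- B replaces A's while-loop state machine (in_quote toggle + escaped-quote lookahead/skip)
-- with one for-each pass counting quotes: a comma is top-level iff the count so far is even (objective: simpler).

-- ===== PORT A =====
-- the while loop of A: index i, flag in_quote; the escaped-quote branch advances i by 2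
def pvLoopA (s : List Char) (in_quote : Bool) (i : Nat) : Bool :=
  if h : i < s.length then
    let char := s[i]
    if char = '"' then
      if in_quote ∧ (i + 1 < s.length ∧ s[i + 1]? = some '"') then
        pvLoopA s in_quote (i + 2)
      else
        pvLoopA s (!in_quote) (i + 1)
    else if char = ',' ∧ in_quote = false then
      true
    else
      pvLoopA s in_quote (i + 1)
  else
    false
termination_by s.length - i

def has_top_level_comma_py (response : String) : Bool :=
  pvLoopA response.toList false 0

-- ===== PORT B =====
-- B's for-each loop with the running quote count
def pvLoopB (s : List Char) (quotes : Nat) : Bool :=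
  match s with
  | [] => false
  | ch :: rest =>
    if ch = '"' then pvLoopB rest (quotes + 1)
    else if ch = ',' ∧ quotes % 2 = 0 then true
    else pvLoopB rest quotes

def has_top_level_comma_py_alt (response : String) : Bool :=
  pvLoopB response.toList 0

-- ===== PRECONDITION & SPEC =====
def Spec_has_top_level_comma_py (response : String) (out : Bool) : Prop := out = has_top_level_comma_py_alt response
instance (response : String) (out : Bool) : Decidable (Spec_has_top_level_comma_py response out) := by unfold Spec_has_top_level_comma_py; infer_instance

-- ===== CLAIM (what is proved, stated in full; the proofs are below) =====
def Claim_equal_has_top_level_comma_py : Prop := ∀ (response : String), Dom_has_top_level_comma_py response → Spec_has_top_level_comma_py response (has_top_level_comma_py response)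

-- ===== LEMMAS AND PROOFS =====

-- B's result depends only on the parity of the quote count
theorem pvLoopB_parity (s : List Char) (q q' : Nat) (h : q % 2 = q' % 2) :
    pvLoopB s q = pvLoopB s q' := by
  induction s generalizing q q' with
  | nil => rfl
  | cons ch rest ih =>
    simp only [pvLoopB]
    split_ifs with h1 h2 h3 h3
    · exact ih (q + 1) (q' + 1) (by omega)
    · rfl
    · exact absurd ⟨h2.1, by omega⟩ h3
    · exact absurd ⟨h3.1, by omega⟩ h2
    · exact ih q q' h

-- main invariant: A's loop from index i with flag b equals B's loop on the suffix
-- with any quote count whose parity matches b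
theorem pvLoopA_eq_B (s : List Char) (i : Nat) (b : Bool) :
    pvLoopA s b i = pvLoopB (s.drop i) (cond b 1 0) := by
  induction hn : s.length - i using Nat.strong_induction_on generalizing i b with
  | _ n ih =>
  by_cases h : i < s.length
  · have hdrop : s.drop i = s[i] :: s.drop (i + 1) := List.drop_eq_getElem_cons h
    rw [pvLoopA, dif_pos h, hdrop]
    by_cases hq : s[i] = '"'
    · by_cases hesc : b = true ∧ (i + 1 < s.length ∧ s[i + 1]? = some '"')
      · -- escaped-quote branch: skip two quotes; parity unchanged
        have h1 : i + 1 < s.length := hesc.2.1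
        have hdrop1 : s.drop (i + 1) = s[i + 1] :: s.drop (i + 2) := List.drop_eq_getElem_cons h1
        have hq1 : s[i + 1] = '"' := by
          have := hesc.2.2; rwa [List.getElem?_eq_getElem h1, Option.some_inj] at this
        rw [if_pos hq, if_pos hesc,
          ih (s.length - (i + 2)) (by omega) (i + 2) b rfl,
          pvLoopB, if_pos hq, hdrop1, hq1, pvLoopB, if_pos rfl]
        exact pvLoopB_parity _ _ _ (by omega)
      · -- lone quote: toggle; count + 1 flips parity
        rw [if_pos hq]
        have hcond : (if b = true ∧ (i + 1 < s.length ∧ s[i + 1]? = some '"') then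
            pvLoopA s b (i + 2) else pvLoopA s (!b) (i + 1)) = pvLoopA s (!b) (i + 1) :=
          if_neg hesc
        rw [hcond, ih (s.length - (i + 1)) (by omega) (i + 1) (!b) rfl,
          pvLoopB, if_pos hq]
        exact pvLoopB_parity _ _ _ (by cases b <;> simp)
    · by_cases hc : s[i] = ',' ∧ b = false
      · rw [if_neg hq, if_pos hc, pvLoopB, if_neg hq, if_pos ⟨hc.1, by rw [hc.2]; rfl⟩]
      · have hc' : ¬ (s[i] = ',' ∧ (cond b 1 0 : Nat) % 2 = 0) := by
          intro ⟨h1, h2⟩; exact hc ⟨h1, by cases b <;> simp_all⟩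
        rw [if_neg hq, if_neg hc, ih (s.length - (i + 1)) (by omega) (i + 1) b rfl,
          pvLoopB, if_neg hq, if_neg hc']
  · rw [pvLoopA, dif_neg h, List.drop_eq_nil_of_le (by omega)]
    rfl

-- ===== VERDICT (by name: the statement is the Claim_ definition above) =====
theorem has_top_level_comma_py_spec : Claim_equal_has_top_level_comma_py := by
  intro response _
  unfold Spec_has_top_level_comma_py has_top_level_comma_py has_top_level_comma_py_alt
  exact pvLoopA_eq_B response.toList 0 false
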